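-- pv_equiv track=rewrite | github.com/LineageOS/android_build_soong | cc/gen_stub_libs.py | symbol_in_version
-- ===== SOURCE A (Python) =====
-- def symbol_in_version(tags, arch, version):
--     """Returns true if the symbol is present for the given version."""
--     introduced_tag = None
--     arch_specific = False
--     for tag in tags:
--         # If there is an arch-specific tag, it should override the common one.
--         if tag.startswith('introduced=') and not arch_specific:
--             introduced_tag = tag
--         elif tag.startswith('introduced-' + arch + '='):
--             introduced_tag = tag
--             arch_specific = True
--
--     if introduced_tag is None:
--         # We found no "introduced" tags, so the symbol has always been
--         # available.
--         return True
--
--     # The tag is a key=value pair, and we only care about the value now.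
--     _, _, version_str = introduced_tag.partition('=')
--     return version >= int(version_str)
-- ===== SOURCE B (Python) =====
-- def symbol_in_version(tags, arch, version):
--     """Returns true if the symbol is present for the given version."""
--     arch_prefix = 'introduced-' + arch + '='
--     tag = None
--     # Arch-specific tags take priority: keep the last one, if any.
--     for t in tags:
--         if t.startswith(arch_prefix):
--             tag = t
--     if tag is None:
--         # No arch-specific tag: fall back to the last common tag.
--         for t in tags:
--             if t.startswith('introduced='):
--                 tag = t
--     if tag is None:
--         return True
--     _, _, version_str = tag.partition('=')
--     return version >= int(version_str)
-- ===== Notes on version B (the rewrite author's own statement) =====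
-- stated objective: simpler
-- what changed: Replaces A's single stateful pass with an introduced_tag/arch_specific flag pair by two flag-free passes: keep the last arch-specific 'introduced-<arch>=' tag, and only if none exists keep the last common 'introduced=' tag; the arch-overrides-common rule becomes precedence between the two searches, and the arch prefix string is built once instead of being re-concatenated on every iteration.
import Mathlib
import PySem

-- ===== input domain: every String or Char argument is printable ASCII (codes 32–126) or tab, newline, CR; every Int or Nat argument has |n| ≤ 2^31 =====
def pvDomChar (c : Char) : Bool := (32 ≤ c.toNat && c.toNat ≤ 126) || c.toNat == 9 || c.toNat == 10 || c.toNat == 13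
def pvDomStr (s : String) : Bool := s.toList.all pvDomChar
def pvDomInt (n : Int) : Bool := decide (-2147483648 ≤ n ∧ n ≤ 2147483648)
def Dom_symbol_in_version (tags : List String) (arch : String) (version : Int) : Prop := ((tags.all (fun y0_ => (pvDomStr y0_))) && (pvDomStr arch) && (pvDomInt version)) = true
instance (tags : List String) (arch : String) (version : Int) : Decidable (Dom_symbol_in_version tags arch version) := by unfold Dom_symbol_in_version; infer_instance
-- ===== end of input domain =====

-- B replaces A's single stateful pass (introduced_tag + arch_specific flag) by two
-- flag-free last-match passes (arch-specific first, common only as fallback): simpler.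
-- Where Python's int() raises ValueError both programs raise; those inputs are outside Pre_.

-- shared primitive: the third component of s.partition('='), i.e. everything after the
-- first '=' ('' if there is none) — exact hand port of str.partition's third result.
def pvAfterEq (s : String) : String :=
  match s.toList.dropWhile (fun c => c ≠ '=') with
  | [] => ""
  | _ :: rest => String.ofList rest

-- ===== PORT A =====
def symbol_in_version (tags : List String) (arch : String) (version : Int) : Bool :=
  let st := tags.foldl (fun (s : Option String × Bool) tag =>
    if PySem.Str.startswith tag "introduced=" && !s.2 then (some tag, s.2)
    else if PySem.Str.startswith tag ("introduced-" ++ arch ++ "=") then (some tag, true)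
    else s) (none, false)
  match st.1 with
  | none => true
  | some t =>
    match PySem.Int.ofStr? (pvAfterEq t) with
    | some n => decide (version ≥ n)
    | none => false  -- int() raises ValueError here; excluded by Pre_

-- ===== PORT B =====
def symbol_in_version_alt (tags : List String) (arch : String) (version : Int) : Bool :=
  let archPrefix := "introduced-" ++ arch ++ "="
  let tag := tags.foldl (fun acc t => if PySem.Str.startswith t archPrefix then some t else acc) none
  let tag := match tag with
    | none => tags.foldl (fun acc t => if PySem.Str.startswith t "introduced=" then some t else acc) none
    | some t => some t
  match tag with
  | none => true
  | some t =>
    match PySem.Int.ofStr? (pvAfterEq t) with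
    | some n => decide (version ≥ n)
    | none => false  -- int() raises ValueError here; excluded by Pre_

-- ===== PRECONDITION & SPEC =====
-- The 'introduced' tag both programs end up selecting (last arch-specific tag, else last
-- common tag), written with filter/getLast? so a reader checks it without running the ports.
def pvChosen (tags : List String) (arch : String) : Option String :=
  ((tags.filter (fun t => PySem.Str.startswith t ("introduced-" ++ arch ++ "="))).getLast?).or
    ((tags.filter (fun t => PySem.Str.startswith t "introduced=")).getLast?)

-- Pre_ excludes exactly the inputs where Python's int() raises ValueError (in both A and B):
-- the selected tag's value after '=' must parse as a Python int.
def Pre_symbol_in_version (tags : List String) (arch : String) (version : Int) : Prop :=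
  (pvChosen tags arch).all (fun t => (PySem.Int.ofStr? (pvAfterEq t)).isSome) = true
instance (tags : List String) (arch : String) (version : Int) : Decidable (Pre_symbol_in_version tags arch version) := by unfold Pre_symbol_in_version; infer_instance

def pvWitness_symbol_in_version : List String × String × Int :=
  (["introduced=9", "introduced-arm=12", "var"], "arm", 10)

def Spec_symbol_in_version (tags : List String) (arch : String) (version : Int) (out : Bool) : Prop := out = symbol_in_version_alt tags arch version
instance (tags : List String) (arch : String) (version : Int) (out : Bool) : Decidable (Spec_symbol_in_version tags arch version out) := by unfold Spec_symbol_in_version; infer_instance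

-- ===== CLAIM (what is proved, stated in full; the proofs are below) =====
def Claim_equal_symbol_in_version : Prop := ∀ (tags : List String) (arch : String) (version : Int), Dom_symbol_in_version tags arch version → Pre_symbol_in_version tags arch version → Spec_symbol_in_version tags arch version (symbol_in_version tags arch version)

-- ===== LEMMAS AND PROOFS =====

-- last-match fold, the common shape of both of B's loops
def pvLastMatch (p : String → Bool) (l : List String) : Option String :=
  l.foldl (fun acc t => if p t then some t else acc) none

theorem pvLastMatch_state (p : String → Bool) (l : List String) :
    ∀ s : Option String, l.foldl (fun acc t => if p t then some t else acc) s
      = (pvLastMatch p l).or s := by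
  induction l with
  | nil => intro s; simp [pvLastMatch]
  | cons t l ih =>
    intro s
    simp only [List.foldl_cons, pvLastMatch] at *
    rw [ih, ih (if p t then some t else none)]
    cases h : (pvLastMatch p l) <;> cases hp : p t <;> simp [pvLastMatch] at *

theorem pvLastMatch_cons (p : String → Bool) (t : String) (l : List String) :
    pvLastMatch p (t :: l) = (pvLastMatch p l).or (if p t then some t else none) := by
  simp only [pvLastMatch, List.foldl_cons]
  exact pvLastMatch_state p l _

-- a tag cannot start with both 'introduced=' and 'introduced-<arch>='
theorem pv_not_both (t arch : String)
    (h1 : PySem.Str.startswith t "introduced=" = true)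
    (h2 : PySem.Str.startswith t ("introduced-" ++ arch ++ "=") = true) : False := by
  simp only [PySem.Str.startswith_eq, PySem.Chars.startswith_iff] at h1 h2
  rcases List.prefix_or_prefix_of_prefix h1 h2 with h | h
  · simp [String.toList_append, List.cons_prefix_cons] at h
  · have := h.length_le
    simp [String.toList_append] at this
    omega
  
-- characterisation of A's stateful fold (flag + tag) by two last-match searches,
-- for any disjoint pair of predicates
theorem pvFoldA_char (p q : String → Bool) (hd : ∀ t, q t = true → p t = true → False)
    (l : List String) :
    ∀ s : Option String × Bool,
      l.foldl (fun (s : Option String × Bool) tag =>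
        if q tag && !s.2 then (some tag, s.2)
        else if p tag then (some tag, true) else s) s
      = match pvLastMatch p l with
        | some u => (some u, true)
        | none => if s.2 then s else ((pvLastMatch q l).or s.1, false) := by
  induction l with
  | nil =>
    intro s
    obtain ⟨a, b⟩ := s
    cases b <;> simp [pvLastMatch]
  | cons t l ih =>
    intro s
    rw [List.foldl_cons, ih, pvLastMatch_cons, pvLastMatch_cons]
    by_cases hp : p t
    · have hq : q t = false := by
        cases hq : q t
        · rfl
        · exact absurd (hd t hq hp) not_false
      cases h : pvLastMatch p l <;> simp [hp, hq]
    · cases h : pvLastMatch p l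
      · by_cases hq : q t
        · obtain ⟨a, b⟩ := s
          cases b <;> simp [hp, hq]
        · obtain ⟨a, b⟩ := s
          cases b <;> simp [hp, hq]
      · simp [hp]

theorem symbol_in_version_spec : Claim_equal_symbol_in_version := by
  unfold Claim_equal_symbol_in_version
  intro tags arch version _ _
  unfold Spec_symbol_in_version
  simp only [symbol_in_version, symbol_in_version_alt]
  rw [pvFoldA_char (fun t => PySem.Str.startswith t ("introduced-" ++ arch ++ "="))
        (fun t => PySem.Str.startswith t "introduced=")
        (fun t => pv_not_both t arch) tags (none, false)]
  rw [show (tags.foldl (fun acc t =>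
        if PySem.Str.startswith t ("introduced-" ++ arch ++ "=") then some t else acc) none)
      = pvLastMatch (fun t => PySem.Str.startswith t ("introduced-" ++ arch ++ "=")) tags from rfl]
  rw [show (tags.foldl (fun acc t =>
        if PySem.Str.startswith t "introduced=" then some t else acc) none)
      = pvLastMatch (fun t => PySem.Str.startswith t "introduced=") tags from rfl]
  cases h : pvLastMatch (fun t => PySem.Str.startswith t ("introduced-" ++ arch ++ "=")) tags
  · cases hc : pvLastMatch (fun t => PySem.Str.startswith t "introduced=") tags <;> simp
  · simp
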